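-- pv_equiv track=rewrite | github.com/doffa-D/Python-Django | Day01/ex04/state.py | my_finder
-- ===== SOURCE A (Python) =====
-- def my_finder(capital):
--     states = {
--         "Oregon": "OR",
--         "Alabama": "AL",
--         "New Jersey": "NJ",
--         "Colorado": "CO"
--     }
--
--     capital_cities = {
--         "OR": "Salem",
--         "AL": "Montgomery",
--         "NJ": "Trenton",
--         "CO": "Denver"
--     }
--     for  state , capital_city in states.items():
--         if capital_cities[capital_city] == capital:
--             return(state)
--
--     return "Unknown capital city"
-- ===== SOURCE B (Python) =====
-- def my_finder(capital):
--     state_by_capital = {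
--         "Salem": "Oregon",
--         "Montgomery": "Alabama",
--         "Trenton": "New Jersey",
--         "Denver": "Colorado",
--     }
--     return state_by_capital.get(capital, "Unknown capital city")
-- ===== Notes on version B (the rewrite author's own statement) =====
-- stated objective: simpler
-- what changed: Replaces the loop over states with a double dict indirection by one precomputed capital-to-state dict and a single .get with default, eliminating the loop and branch.
import Mathlib
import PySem

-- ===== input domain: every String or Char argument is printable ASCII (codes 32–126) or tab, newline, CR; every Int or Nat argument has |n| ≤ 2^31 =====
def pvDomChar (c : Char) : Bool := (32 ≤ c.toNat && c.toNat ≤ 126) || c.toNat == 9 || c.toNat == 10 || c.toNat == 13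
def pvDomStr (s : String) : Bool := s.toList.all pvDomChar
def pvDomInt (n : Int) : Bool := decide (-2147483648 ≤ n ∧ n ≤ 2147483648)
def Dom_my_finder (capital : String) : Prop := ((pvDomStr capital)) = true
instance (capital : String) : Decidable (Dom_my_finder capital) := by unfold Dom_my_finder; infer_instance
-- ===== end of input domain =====

-- B replaces A's loop over states and two dict lookups by one inverse dict and a single .get with default (simpler).

-- ===== PORT A =====
-- A's two literal dicts
def pvStatesA : PySem.Dict String String :=
  PySem.Dict.ofList [("Oregon", "OR"), ("Alabama", "AL"), ("New Jersey", "NJ"), ("Colorado", "CO")]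

def pvCapitalCitiesA : PySem.Dict String String :=
  PySem.Dict.ofList [("OR", "Salem"), ("AL", "Montgomery"), ("NJ", "Trenton"), ("CO", "Denver")]

-- A's loop with early return over states.items(); capital_cities[abbr] always hits a key,
-- so getD never takes its default here.
def pvLoopA (capital : String) : List (String × String) → String
  | [] => "Unknown capital city"
  | (state, abbr) :: rest =>
      if PySem.Dict.getD pvCapitalCitiesA abbr "" == capital then state
      else pvLoopA capital rest

def my_finder (capital : String) : String :=
  pvLoopA capital pvStatesA.items

-- ===== PORT B =====
def pvStateByCapital : PySem.Dict String String :=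
  PySem.Dict.ofList [("Salem", "Oregon"), ("Montgomery", "Alabama"), ("Trenton", "New Jersey"), ("Denver", "Colorado")]

def my_finder_alt (capital : String) : String :=
  PySem.Dict.getD pvStateByCapital capital "Unknown capital city"

-- ===== PRECONDITION & SPEC =====
def Spec_my_finder (capital : String) (out : String) : Prop := out = my_finder_alt capital
instance (capital : String) (out : String) : Decidable (Spec_my_finder capital out) := by unfold Spec_my_finder; infer_instance

-- ===== CLAIM (what is proved, stated in full; the proofs are below) =====
def Claim_equal_my_finder : Prop := ∀ (capital : String), Dom_my_finder capital → Spec_my_finder capital (my_finder capital)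

-- ===== LEMMAS AND PROOFS =====

theorem itemsA_eq : pvStatesA.items = [("Oregon", "OR"), ("Alabama", "AL"), ("New Jersey", "NJ"), ("Colorado", "CO")] := by decide

theorem lookA_eq (abbr : String) :
    PySem.Dict.getD pvCapitalCitiesA abbr "" =
      (if abbr = "OR" then "Salem" else if abbr = "AL" then "Montgomery"
       else if abbr = "NJ" then "Trenton" else if abbr = "CO" then "Denver" else "") := by
  unfold pvCapitalCitiesA
  by_cases h1 : abbr = "OR"
  · subst h1; decide
  by_cases h2 : abbr = "AL"
  · subst h2; decide
  by_cases h3 : abbr = "NJ"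
  · subst h3; decide
  by_cases h4 : abbr = "CO"
  · subst h4; decide
  simp [PySem.Dict.getD, PySem.Dict.ofList, PySem.Dict.update, PySem.Dict.empty,
    PySem.Dict.insert, PySem.Dict.get?, PySem.Dict.contains, List.find?_nil,
    beq_iff_eq, Ne.symm h1, Ne.symm h2, Ne.symm h3, Ne.symm h4, h1, h2, h3, h4]

theorem alt_eq_mk : pvStateByCapital = PySem.Dict.mk
    [("Salem", "Oregon"), ("Montgomery", "Alabama"), ("Trenton", "New Jersey"), ("Denver", "Colorado")] := by decide

-- ===== VERDICT (by name: the statement is the Claim_ definition above) =====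
theorem my_finder_spec : Claim_equal_my_finder := by
  intro capital _
  unfold Spec_my_finder my_finder my_finder_alt
  by_cases h1 : capital = "Salem"
  · subst h1; decide
  by_cases h2 : capital = "Montgomery"
  · subst h2; decide
  by_cases h3 : capital = "Trenton"
  · subst h3; decide
  by_cases h4 : capital = "Denver"
  · subst h4; decide
  -- capital matches no capital city: A's loop falls through, B's get takes the default
  rw [itemsA_eq, alt_eq_mk]
  simp only [pvLoopA, lookA_eq]
  simp [PySem.Dict.getD, Ne.symm h1, Ne.symm h2, Ne.symm h3, Ne.symm h4,
    PySem.Dict.get?, List.find?_nil]
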